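-- pv_equiv track=rewrite | github.com/vscalar/Alps | 25-1 ALPS/week6/10844.py | get_num_of_stair_nums
-- ===== SOURCE A (Python) =====
-- MOD = 1000000000
--
-- def get_num_of_stair_nums(digits:int)-> int:
--     dp = [[0]* 10 for _ in range(digits)]
--     dp[0] = [0] + [1] * 9
--     for i in range(digits-1):
--         dp[i+1][0] = dp[i][1]
--         dp[i+1][9] = dp[i][8]
--         for j in range(1, 9):
--             dp[i+1][j] = (dp[i][j-1] + dp[i][j+1])%MOD
--
--     return sum(dp[-1])%MOD
-- ===== SOURCE B (Python) =====
-- MOD = 1000000000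
--
-- def _mat_mult(A, B):
--     return [[sum(A[i][k] * B[k][j] for k in range(10)) % MOD
--              for j in range(10)] for i in range(10)]
--
-- def _mat_pow(M, k):
--     if k == 0:
--         return [[1 if i == j else 0 for j in range(10)] for i in range(10)]
--     half = _mat_pow(M, k // 2)
--     sq = _mat_mult(half, half)
--     return _mat_mult(sq, M) if k % 2 else sq
--
-- def get_num_of_stair_nums(digits: int) -> int:
--     T = [[1 if abs(i - j) == 1 else 0 for j in range(10)] for i in range(10)]
--     P = _mat_pow(T, digits - 1)
--     v0 = [0] + [1] * 9
--     return sum(P[i][j] * v0[j] for i in range(10) for j in range(10)) % MOD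
-- ===== Notes on version B (the rewrite author's own statement) =====
-- stated objective: faster
-- what changed: Replaces the O(digits) row-by-row DP table with binary exponentiation of the fixed 10x10 adjacent-digit transition matrix mod 1e9.
-- outside the precondition, e.g. on get_num_of_stair_nums(0): A raises IndexError, B raises RecursionError
import Mathlib
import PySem

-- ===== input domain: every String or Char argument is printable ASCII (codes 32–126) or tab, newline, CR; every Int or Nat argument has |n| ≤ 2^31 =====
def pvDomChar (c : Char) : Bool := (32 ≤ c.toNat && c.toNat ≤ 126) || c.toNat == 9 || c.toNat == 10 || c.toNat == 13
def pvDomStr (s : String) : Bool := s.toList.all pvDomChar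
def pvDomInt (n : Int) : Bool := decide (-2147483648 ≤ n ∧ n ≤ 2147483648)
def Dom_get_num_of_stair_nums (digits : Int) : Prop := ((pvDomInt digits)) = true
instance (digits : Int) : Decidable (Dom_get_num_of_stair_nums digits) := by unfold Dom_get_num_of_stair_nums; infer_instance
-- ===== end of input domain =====

-- B replaces A's O(digits) row-by-row DP with binary exponentiation of the fixed
-- 10x10 adjacent-digit transition matrix mod 1e9 (objective: faster).

-- ===== PORT A =====
-- A-side helpers: the bodies of A's two loops. Python lists are mutable arrays, so dp is
-- ported as Array; all indices here come from range() and are nonnegative, so .toNat and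
-- the in-bounds setIfInBounds/getD are exact where Python does not raise.
def aInner (i : Int) (dp : Array (Array Int)) (j : Int) : Array (Array Int) :=
  -- dp[i+1][j] = (dp[i][j-1] + dp[i][j+1]) % MOD
  dp.setIfInBounds (i+1).toNat ((dp.getD (i+1).toNat #[]).setIfInBounds j.toNat
    (PySem.Int.mod ((dp.getD i.toNat #[]).getD (j-1).toNat 0
                  + (dp.getD i.toNat #[]).getD (j+1).toNat 0) 1000000000))

def aOuter (dp : Array (Array Int)) (i : Int) : Array (Array Int) :=
  -- dp[i+1][0] = dp[i][1]
  let dp := dp.setIfInBounds (i+1).toNat ((dp.getD (i+1).toNat #[]).setIfInBounds 0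
              ((dp.getD i.toNat #[]).getD 1 0))
  -- dp[i+1][9] = dp[i][8]
  let dp := dp.setIfInBounds (i+1).toNat ((dp.getD (i+1).toNat #[]).setIfInBounds 9
              ((dp.getD i.toNat #[]).getD 8 0))
  -- for j in range(1, 9): dp[i+1][j] = (dp[i][j-1] + dp[i][j+1]) % MOD
  (PySem.List.pyRange 1 9 1).foldl (aInner i) dp

def get_num_of_stair_nums (digits : Int) : Int :=
  -- dp = [[0]*10 for _ in range(digits)]
  let dp : Array (Array Int) := ((PySem.List.pyRange 0 digits 1).map
      (fun _ => (List.replicate 10 (0:Int)).toArray)).toArray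
  -- dp[0] = [0] + [1]*9  (raises IndexError when dp is empty, i.e. digits <= 0: outside Pre_)
  let dp := dp.setIfInBounds 0 (0 :: List.replicate 9 (1:Int)).toArray
  -- for i in range(digits-1): …
  let dp := (PySem.List.pyRange 0 (digits-1) 1).foldl aOuter dp
  -- return sum(dp[-1]) % MOD  (dp[-1] is the last row; dp is nonempty under Pre_)
  PySem.Int.mod (dp.getD (dp.size - 1) #[]).toList.sum 1000000000

-- ===== PORT B =====
-- B-side helpers (from Source B). range(10) comprehensions are ported as List.range 10;
-- every index is in range, so getD is exact there.
def matMult (A B : List (List Int)) : List (List Int) :=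
  (List.range 10).map (fun i => (List.range 10).map (fun j =>
    PySem.Int.mod (((List.range 10).map
      (fun k => ((A.getD i []).getD k 0) * ((B.getD k []).getD j 0))).sum) 1000000000))

-- _mat_pow(M, k): k == 0 → identity, else square _mat_pow(M, k // 2), times M if k odd.
-- (Source B's exponent is a Python int; under Pre_ it is ≥ 0, so it is ported as Nat.)
def matPow (M : List (List Int)) : Nat → List (List Int)
  | 0 => (List.range 10).map (fun i => (List.range 10).map (fun j => if i = j then (1:Int) else 0))
  | (k+1) =>
      let half := matPow M ((k+1)/2)
      let sq := matMult half half
      if (k+1) % 2 = 1 then matMult sq M else sq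
decreasing_by omega

def get_num_of_stair_nums_alt (digits : Int) : Int :=
  -- T = [[1 if abs(i - j) == 1 else 0 for j in range(10)] for i in range(10)]
  let T : List (List Int) := (List.range 10).map (fun i => (List.range 10).map
    (fun j => if ((i:Int) - (j:Int)).natAbs = 1 then (1:Int) else 0))
  -- P = _mat_pow(T, digits - 1)
  let P := matPow T (digits - 1).toNat
  -- v0 = [0] + [1]*9
  let v0 : List Int := 0 :: List.replicate 9 (1:Int)
  -- return sum(P[i][j] * v0[j] for i in range(10) for j in range(10)) % MOD
  PySem.Int.mod (((List.range 10).map (fun i =>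
    ((List.range 10).map (fun j => ((P.getD i []).getD j 0) * (v0.getD j 0))).sum)).sum) 1000000000

-- ===== PRECONDITION & SPEC =====
-- Pre_: Python A raises IndexError for digits <= 0 (dp is empty, so dp[0] = … fails);
-- Python B's recursion does not return there either. Both return for digits >= 1.
def Pre_get_num_of_stair_nums (digits : Int) : Prop := 1 ≤ digits
instance (digits : Int) : Decidable (Pre_get_num_of_stair_nums digits) := by
  unfold Pre_get_num_of_stair_nums; infer_instance
def pvWitness_get_num_of_stair_nums : Int := 3

def Spec_get_num_of_stair_nums (digits : Int) (out : Int) : Prop := out = get_num_of_stair_nums_alt digits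
instance (digits : Int) (out : Int) : Decidable (Spec_get_num_of_stair_nums digits out) := by
  unfold Spec_get_num_of_stair_nums; infer_instance

-- ===== CLAIM =====
def Claim_equal_get_num_of_stair_nums : Prop :=
  ∀ (digits : Int), Dom_get_num_of_stair_nums digits → Pre_get_num_of_stair_nums digits →
    Spec_get_num_of_stair_nums digits (get_num_of_stair_nums digits)

-- ===== LEMMAS AND PROOFS =====

-- A pure-List model of A's loops (the Array port is proved equal to it below).
def aInnerL (i : Int) (dp : List (List Int)) (j : Int) : List (List Int) :=
  PySem.List.pySetD dp (i+1) (PySem.List.pySetD (PySem.List.pyGetD dp (i+1) []) j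
    (PySem.Int.mod ((PySem.List.pyGetD (PySem.List.pyGetD dp i []) (j-1) 0)
                  + (PySem.List.pyGetD (PySem.List.pyGetD dp i []) (j+1) 0)) 1000000000))

def aOuterL (dp : List (List Int)) (i : Int) : List (List Int) :=
  let dp := PySem.List.pySetD dp (i+1) (PySem.List.pySetD (PySem.List.pyGetD dp (i+1) []) 0
              (PySem.List.pyGetD (PySem.List.pyGetD dp i []) 1 0))
  let dp := PySem.List.pySetD dp (i+1) (PySem.List.pySetD (PySem.List.pyGetD dp (i+1) []) 9
              (PySem.List.pyGetD (PySem.List.pyGetD dp i []) 8 0))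
  (PySem.List.pyRange 1 9 1).foldl (aInnerL i) dp

def listA (digits : Int) : Int :=
  let dp : List (List Int) := (PySem.List.pyRange 0 digits 1).map (fun _ => List.replicate 10 (0:Int))
  let dp := PySem.List.pySetD dp 0 (0 :: List.replicate 9 (1:Int))
  let dp := (PySem.List.pyRange 0 (digits-1) 1).foldl aOuterL dp
  PySem.Int.mod (PySem.List.pyGetD dp (-1) []).sum 1000000000

-- The row update A performs on a length-10 row, as one function.
def stepA : List Int → List Int
  | [a0,a1,a2,a3,a4,a5,a6,a7,a8,a9] =>
      [a1,
       PySem.Int.mod (a0+a2) 1000000000, PySem.Int.mod (a1+a3) 1000000000,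
       PySem.Int.mod (a2+a4) 1000000000, PySem.Int.mod (a3+a5) 1000000000,
       PySem.Int.mod (a4+a6) 1000000000, PySem.Int.mod (a5+a7) 1000000000,
       PySem.Int.mod (a6+a8) 1000000000, PySem.Int.mod (a7+a9) 1000000000,
       a8]
  | l => l

def row0 : List Int := 0 :: List.replicate 9 (1:Int)

-- Views of rows / matrices in ZMod 1e9, where all the '%' noise disappears.
def vz (v : List Int) : Fin 10 → ZMod 1000000000 := fun i => ((v.getD i 0 : Int) : ZMod 1000000000)
def mz (A : List (List Int)) : Matrix (Fin 10) (Fin 10) (ZMod 1000000000) :=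
  Matrix.of fun i j => (((A.getD i []).getD j 0 : Int) : ZMod 1000000000)

def Tz : Matrix (Fin 10) (Fin 10) (ZMod 1000000000) :=
  !![0,1,0,0,0,0,0,0,0,0;
     1,0,1,0,0,0,0,0,0,0;
     0,1,0,1,0,0,0,0,0,0;
     0,0,1,0,1,0,0,0,0,0;
     0,0,0,1,0,1,0,0,0,0;
     0,0,0,0,1,0,1,0,0,0;
     0,0,0,0,0,1,0,1,0,0;
     0,0,0,0,0,0,1,0,1,0;
     0,0,0,0,0,0,0,1,0,1;
     0,0,0,0,0,0,0,0,1,0]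

lemma exists_ten (l : List Int) (h : l.length = 10) :
    ∃ a0 a1 a2 a3 a4 a5 a6 a7 a8 a9 : Int, l = [a0,a1,a2,a3,a4,a5,a6,a7,a8,a9] := by
  rcases l with _|⟨a0,_|⟨a1,_|⟨a2,_|⟨a3,_|⟨a4,_|⟨a5,_|⟨a6,_|⟨a7,_|⟨a8,_|⟨a9,_|⟨x,l⟩⟩⟩⟩⟩⟩⟩⟩⟩⟩⟩ <;> simp_all

lemma length_stepA (l : List Int) (h : l.length = 10) : (stepA l).length = 10 := by
  obtain ⟨a0,a1,a2,a3,a4,a5,a6,a7,a8,a9, rfl⟩ := exists_ten l h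
  simp [stepA]

lemma length_iter (k : Nat) : (stepA^[k] row0).length = 10 := by
  induction k with
  | zero => simp [row0]
  | succ n ih => rw [Function.iterate_succ_apply']; exact length_stepA _ ih

lemma set_getD_self (l : List (List Int)) (i : Nat) (h : i < l.length) (r : List Int) :
    (l.set i r).getD i [] = r := by
  rw [List.getD_eq_getElem?_getD, List.getElem?_set_self h]; rfl

lemma set_getD_ne (l : List (List Int)) (i j : Nat) (h : i ≠ j) (r : List Int) :
    (l.set i r).getD j [] = l.getD j [] := by
  rw [List.getD_eq_getElem?_getD, List.getElem?_set_ne h, List.getD_eq_getElem?_getD]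

lemma pySetD_ten_0 (r0 r1 r2 r3 r4 r5 r6 r7 r8 r9 x : Int) :
    PySem.List.pySetD [r0,r1,r2,r3,r4,r5,r6,r7,r8,r9] (0:Int) x = [x,r1,r2,r3,r4,r5,r6,r7,r8,r9] := rfl
lemma pySetD_ten_1 (r0 r1 r2 r3 r4 r5 r6 r7 r8 r9 x : Int) :
    PySem.List.pySetD [r0,r1,r2,r3,r4,r5,r6,r7,r8,r9] (1:Int) x = [r0,x,r2,r3,r4,r5,r6,r7,r8,r9] := rfl
lemma pySetD_ten_2 (r0 r1 r2 r3 r4 r5 r6 r7 r8 r9 x : Int) :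
    PySem.List.pySetD [r0,r1,r2,r3,r4,r5,r6,r7,r8,r9] (2:Int) x = [r0,r1,x,r3,r4,r5,r6,r7,r8,r9] := rfl
lemma pySetD_ten_3 (r0 r1 r2 r3 r4 r5 r6 r7 r8 r9 x : Int) :
    PySem.List.pySetD [r0,r1,r2,r3,r4,r5,r6,r7,r8,r9] (3:Int) x = [r0,r1,r2,x,r4,r5,r6,r7,r8,r9] := rfl
lemma pySetD_ten_4 (r0 r1 r2 r3 r4 r5 r6 r7 r8 r9 x : Int) :
    PySem.List.pySetD [r0,r1,r2,r3,r4,r5,r6,r7,r8,r9] (4:Int) x = [r0,r1,r2,r3,x,r5,r6,r7,r8,r9] := rfl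
lemma pySetD_ten_5 (r0 r1 r2 r3 r4 r5 r6 r7 r8 r9 x : Int) :
    PySem.List.pySetD [r0,r1,r2,r3,r4,r5,r6,r7,r8,r9] (5:Int) x = [r0,r1,r2,r3,r4,x,r6,r7,r8,r9] := rfl
lemma pySetD_ten_6 (r0 r1 r2 r3 r4 r5 r6 r7 r8 r9 x : Int) :
    PySem.List.pySetD [r0,r1,r2,r3,r4,r5,r6,r7,r8,r9] (6:Int) x = [r0,r1,r2,r3,r4,r5,x,r7,r8,r9] := rfl
lemma pySetD_ten_7 (r0 r1 r2 r3 r4 r5 r6 r7 r8 r9 x : Int) :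
    PySem.List.pySetD [r0,r1,r2,r3,r4,r5,r6,r7,r8,r9] (7:Int) x = [r0,r1,r2,r3,r4,r5,r6,x,r8,r9] := rfl
lemma pySetD_ten_8 (r0 r1 r2 r3 r4 r5 r6 r7 r8 r9 x : Int) :
    PySem.List.pySetD [r0,r1,r2,r3,r4,r5,r6,r7,r8,r9] (8:Int) x = [r0,r1,r2,r3,r4,r5,r6,r7,x,r9] := rfl
lemma pySetD_ten_9 (r0 r1 r2 r3 r4 r5 r6 r7 r8 r9 x : Int) :
    PySem.List.pySetD [r0,r1,r2,r3,r4,r5,r6,r7,r8,r9] (9:Int) x = [r0,r1,r2,r3,r4,r5,r6,r7,r8,x] := rfl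
lemma pyGetD_ten_0 (r0 r1 r2 r3 r4 r5 r6 r7 r8 r9 : Int) :
    PySem.List.pyGetD [r0,r1,r2,r3,r4,r5,r6,r7,r8,r9] (0:Int) 0 = r0 := rfl
lemma pyGetD_ten_1 (r0 r1 r2 r3 r4 r5 r6 r7 r8 r9 : Int) :
    PySem.List.pyGetD [r0,r1,r2,r3,r4,r5,r6,r7,r8,r9] (1:Int) 0 = r1 := rfl
lemma pyGetD_ten_2 (r0 r1 r2 r3 r4 r5 r6 r7 r8 r9 : Int) :
    PySem.List.pyGetD [r0,r1,r2,r3,r4,r5,r6,r7,r8,r9] (2:Int) 0 = r2 := rfl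
lemma pyGetD_ten_3 (r0 r1 r2 r3 r4 r5 r6 r7 r8 r9 : Int) :
    PySem.List.pyGetD [r0,r1,r2,r3,r4,r5,r6,r7,r8,r9] (3:Int) 0 = r3 := rfl
lemma pyGetD_ten_4 (r0 r1 r2 r3 r4 r5 r6 r7 r8 r9 : Int) :
    PySem.List.pyGetD [r0,r1,r2,r3,r4,r5,r6,r7,r8,r9] (4:Int) 0 = r4 := rfl
lemma pyGetD_ten_5 (r0 r1 r2 r3 r4 r5 r6 r7 r8 r9 : Int) :
    PySem.List.pyGetD [r0,r1,r2,r3,r4,r5,r6,r7,r8,r9] (5:Int) 0 = r5 := rfl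
lemma pyGetD_ten_6 (r0 r1 r2 r3 r4 r5 r6 r7 r8 r9 : Int) :
    PySem.List.pyGetD [r0,r1,r2,r3,r4,r5,r6,r7,r8,r9] (6:Int) 0 = r6 := rfl
lemma pyGetD_ten_7 (r0 r1 r2 r3 r4 r5 r6 r7 r8 r9 : Int) :
    PySem.List.pyGetD [r0,r1,r2,r3,r4,r5,r6,r7,r8,r9] (7:Int) 0 = r7 := rfl
lemma pyGetD_ten_8 (r0 r1 r2 r3 r4 r5 r6 r7 r8 r9 : Int) :
    PySem.List.pyGetD [r0,r1,r2,r3,r4,r5,r6,r7,r8,r9] (8:Int) 0 = r8 := rfl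
lemma pyGetD_ten_9 (r0 r1 r2 r3 r4 r5 r6 r7 r8 r9 : Int) :
    PySem.List.pyGetD [r0,r1,r2,r3,r4,r5,r6,r7,r8,r9] (9:Int) 0 = r9 := rfl

lemma aOuter_eq (dp : List (List Int)) (i : Nat) (h1 : i + 1 < dp.length)
    (hi : (dp.getD i []).length = 10) (hi1 : (dp.getD (i+1) []).length = 10) :
    aOuterL dp (i : Int) = dp.set (i+1) (stepA (dp.getD i [])) := by
  obtain ⟨a0,a1,a2,a3,a4,a5,a6,a7,a8,a9, ha⟩ := exists_ten _ hi
  obtain ⟨b0,b1,b2,b3,b4,b5,b6,b7,b8,b9, hb⟩ := exists_ten _ hi1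
  have hr : PySem.List.pyRange 1 9 1 = [1,2,3,4,5,6,7,8] := by decide
  have hm : (i : Int) + 1 = ((i+1 : Nat) : Int) := by push_cast; ring
  have hne : i + 1 ≠ i := by omega
  have step : ∀ (r : List Int) (j : Int),
      aInnerL i (dp.set (i+1) r) j = dp.set (i+1) (PySem.List.pySetD r j
        (PySem.Int.mod ((PySem.List.pyGetD [a0,a1,a2,a3,a4,a5,a6,a7,a8,a9] (j-1) 0)
          + (PySem.List.pyGetD [a0,a1,a2,a3,a4,a5,a6,a7,a8,a9] (j+1) 0)) 1000000000)) := by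
    intro r j
    simp only [aInnerL, hm, PySem.List.pySetD_natCast, PySem.List.pyGetD_natCast,
      set_getD_self dp (i+1) h1, set_getD_ne dp (i+1) i hne, ha, List.set_set]
  simp only [aOuterL, hr, List.foldl_cons, List.foldl_nil, hm,
    PySem.List.pySetD_natCast, PySem.List.pyGetD_natCast, hb, ha,
    set_getD_self dp (i+1) h1, set_getD_ne dp (i+1) i hne, List.set_set]
  rw [pyGetD_ten_1, pyGetD_ten_8, pySetD_ten_0, pySetD_ten_9]
  rw [step, pySetD_ten_1, step, pySetD_ten_2, step, pySetD_ten_3, step, pySetD_ten_4, step, pySetD_ten_5, step, pySetD_ten_6, step, pySetD_ten_7, step, pySetD_ten_8]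
  norm_num [stepA, pyGetD_ten_0, pyGetD_ten_1, pyGetD_ten_2, pyGetD_ten_3, pyGetD_ten_4,
    pyGetD_ten_5, pyGetD_ten_6, pyGetD_ten_7, pyGetD_ten_8, pyGetD_ten_9]

lemma aFold (dp0 : List (List Int)) (D : Nat) (h0 : dp0.length = D)
    (hrow0 : dp0.getD 0 [] = row0)
    (hrest : ∀ k, 0 < k → k < D → dp0.getD k [] = List.replicate 10 (0:Int)) :
    ∀ n, n + 1 ≤ D →
      ((List.range n).foldl (fun dp (k:Nat) => aOuterL dp (k:Int)) dp0).length = D ∧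
      ∀ k, k < D → ((List.range n).foldl (fun dp (k:Nat) => aOuterL dp (k:Int)) dp0).getD k [] =
          if k ≤ n then stepA^[k] row0 else List.replicate 10 (0:Int) := by
  intro n
  induction n with
  | zero =>
    intro _
    refine ⟨by simpa using h0, ?_⟩
    intro k hk
    simp only [List.range_zero, List.foldl_nil]
    rcases Nat.eq_zero_or_pos k with rfl | hpos
    · simpa using hrow0
    · rw [hrest k hpos hk]; simp [Nat.pos_iff_ne_zero.mp hpos]
  | succ n ih =>
    intro hD
    obtain ⟨ihlen, ihget⟩ := ih (by omega)
    set dpn := (List.range n).foldl (fun dp (k:Nat) => aOuterL dp (k:Int)) dp0 with hdpn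
    have hlen9 : (dpn.getD n []).length = 10 := by
      rw [ihget n (by omega)]; simp [length_iter]
    have hlen10 : (dpn.getD (n+1) []).length = 10 := by
      rw [ihget (n+1) (by omega)]
      simp [show ¬ (n+1 ≤ n) by omega]
    have hfold : (List.range (n+1)).foldl (fun dp (k:Nat) => aOuterL dp (k:Int)) dp0
        = aOuterL dpn (n:Int) := by
      rw [List.range_succ, List.foldl_append, List.foldl_cons, List.foldl_nil]
    rw [hfold, aOuter_eq dpn n (by omega) hlen9 hlen10]
    constructor
    · simpa using ihlen
    · intro k hk
      rcases eq_or_ne k (n+1) with rfl | hne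
      · rw [set_getD_self _ _ (by omega), ihget n (by omega)]
        simp [Function.iterate_succ_apply']
      · rw [set_getD_ne _ _ _ (Ne.symm hne), ihget k hk]
        have hiff : k ≤ n ↔ k ≤ n+1 := by omega
        simp only [hiff]

lemma getD_map_const {α : Type} (l : List α) (c : List Int) (k : Nat) (h : k < l.length) :
    (l.map (fun _ => c)).getD k [] = c := by
  rw [List.getD_eq_getElem?_getD, List.getElem?_map, List.getElem?_eq_getElem h]
  rfl

lemma A_char (digits : Int) (h : 1 ≤ digits) :
    listA digits
      = PySem.Int.mod (stepA^[(digits-1).toNat] row0).sum 1000000000 := by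
  show PySem.Int.mod (PySem.List.pyGetD ((PySem.List.pyRange 0 (digits-1) 1).foldl aOuterL
      (PySem.List.pySetD ((PySem.List.pyRange 0 digits 1).map (fun _ => List.replicate 10 (0:Int))) 0
        (0 :: List.replicate 9 (1:Int)))) (-1) []).sum 1000000000
    = PySem.Int.mod (stepA^[(digits-1).toNat] row0).sum 1000000000
  set D := digits.toNat with hDdef
  have hD1 : 1 ≤ D := by omega
  have hinit_len : ((PySem.List.pyRange 0 digits 1).map (fun _ => List.replicate 10 (0:Int))).length = D := by
    simp [PySem.List.length_pyRange_one, hDdef]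
  set dp0 := PySem.List.pySetD
      ((PySem.List.pyRange 0 digits 1).map (fun _ => List.replicate 10 (0:Int))) 0
      (0 :: List.replicate 9 (1:Int)) with hdp0
  have hdp0' : dp0 = ((PySem.List.pyRange 0 digits 1).map (fun _ => List.replicate 10 (0:Int))).set 0 row0 := by
    rw [hdp0, PySem.List.pySetD_of_nonneg _ _ (by norm_num)]
    rfl
  have h0 : dp0.length = D := by rw [hdp0']; simpa using hinit_len
  have hrow0 : dp0.getD 0 [] = row0 := by
    rw [hdp0']; exact set_getD_self _ 0 (by omega) _
  have hrest : ∀ k, 0 < k → k < D → dp0.getD k [] = List.replicate 10 (0:Int) := by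
    intro k hk hkD
    have hplen : (PySem.List.pyRange 0 digits 1).length = D := by
      simp [PySem.List.length_pyRange_one, hDdef]
    rw [hdp0', set_getD_ne _ _ _ (by omega),
      getD_map_const _ _ _ ((by omega : k < D).trans_eq hplen.symm)]
  have hfold : (PySem.List.pyRange 0 (digits-1) 1).foldl aOuterL dp0
      = (List.range (digits-1).toNat).foldl (fun dp (k:Nat) => aOuterL dp (k:Int)) dp0 := by
    rw [PySem.List.pyRange_one, List.foldl_map]
    simp
  rw [hfold]
  obtain ⟨hlen, hget⟩ := aFold dp0 D h0 hrow0 hrest ((digits-1).toNat) (by omega)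
  set dpf := (List.range (digits-1).toNat).foldl (fun dp (k:Nat) => aOuterL dp (k:Int)) dp0 with hdpf
  have hne : dpf ≠ [] := by
    intro hempty; rw [hempty] at hlen; simp at hlen; omega
  rw [PySem.List.pyGetD_neg_one _ _ hne]
  have hlast : dpf.getLast hne = dpf.getD (D-1) [] := by
    rw [List.getLast_eq_getElem,
      List.getD_eq_getElem?_getD, List.getElem?_eq_getElem (by omega : D-1 < dpf.length)]
    simp only [Option.getD_some]
    congr 1
    omega
  rw [hlast, hget (D-1) (by omega)]
  have : D - 1 = (digits-1).toNat := by omega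
  simp [this]

lemma cast_emod (a : Int) :
    ((a % (1000000000:Int) : Int) : ZMod 1000000000) = (a : ZMod 1000000000) := by
  rw [ZMod.intCast_eq_intCast_iff]
  unfold Int.ModEq
  rw [(by norm_num : ((1000000000 : Nat) : Int) = (1000000000 : Int))]
  exact Int.emod_emod_of_dvd a dvd_rfl

lemma cast_pymod (a : Int) :
    ((PySem.Int.mod a 1000000000 : Int) : ZMod 1000000000) = (a : ZMod 1000000000) := by
  rw [PySem.Int.mod_eq_emod_of_pos (by norm_num : (0:Int) < 1000000000)]
  rw [ZMod.intCast_eq_intCast_iff]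
  unfold Int.ModEq
  rw [(by norm_num : ((1000000000 : Nat) : Int) = (1000000000 : Int))]
  exact Int.emod_emod_of_dvd a dvd_rfl

lemma getD_map_range' {β : Type} [Inhabited β] (f : Nat → β) (k : Nat) (d : β) (h : k < 10) :
    ((List.range 10).map f).getD k d = f k := by
  rw [List.getD_eq_getElem?_getD, List.getElem?_map, List.getElem?_range h]
  rfl

lemma mz_matMult (A B : List (List Int)) : mz (matMult A B) = mz A * mz B := by
  ext i j
  have hi : (i:Nat) < 10 := i.isLt
  have hj : (j:Nat) < 10 := j.isLt
  show (((matMult A B).getD i []).getD j 0 : ZMod 1000000000) = _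
  rw [matMult, getD_map_range' _ _ _ hi, getD_map_range' _ _ _ hj, cast_pymod]
  rw [Matrix.mul_apply]
  rw [show List.range 10 = [0,1,2,3,4,5,6,7,8,9] from rfl]
  simp only [List.map_cons, List.map_nil, List.sum_cons, List.sum_nil, add_zero]
  push_cast
  rw [Fin.sum_univ_succ, Fin.sum_univ_succ, Fin.sum_univ_succ, Fin.sum_univ_succ,
    Fin.sum_univ_succ, Fin.sum_univ_succ, Fin.sum_univ_succ, Fin.sum_univ_succ,
    Fin.sum_univ_succ, Fin.sum_univ_one]
  rfl

lemma mz_one : mz ((List.range 10).map (fun i => (List.range 10).map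
    (fun j => if i = j then (1:Int) else 0))) = 1 := by
  ext i j
  simp only [mz, Matrix.of_apply]
  rw [getD_map_range' _ _ _ i.isLt, getD_map_range' _ _ _ j.isLt, Matrix.one_apply]
  by_cases h : i = j
  · simp [h]
  · have : (i:Nat) ≠ (j:Nat) := fun hc => h (Fin.ext hc)
    simp [h, this]

lemma mz_matPow (M : List (List Int)) (k : Nat) : mz (matPow M k) = (mz M) ^ k := by
  induction k using Nat.strong_induction_on with
  | _ k ih =>
    match k with
    | 0 => simpa [matPow] using mz_one
    | (n+1) =>
      rw [matPow]
      have ihh := ih ((n+1)/2) (by omega)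
      by_cases hodd : (n+1) % 2 = 1
      · rw [if_pos hodd, mz_matMult, mz_matMult, ihh, ← pow_add, ← pow_succ]
        congr 1
        omega
      · rw [if_neg hodd, mz_matMult, ihh, ← pow_add]
        congr 1
        omega

lemma Tz_eq : mz ((List.range 10).map (fun i => (List.range 10).map
    (fun j => if ((i:Int) - (j:Int)).natAbs = 1 then (1:Int) else 0))) = Tz := by
  decide

lemma vz_stepA (v : List Int) (h : v.length = 10) :
    vz (stepA v) = Tz.mulVec (vz v) := by
  obtain ⟨c0,c1,c2,c3,c4,c5,c6,c7,c8,c9, rfl⟩ := exists_ten v h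
  funext i
  fin_cases i <;>
    simp [Matrix.mulVec, dotProduct, Fin.sum_univ_succ, Tz, vz, stepA, cast_emod, Int.cast_add]

lemma cast_sum_ten (l : List Int) (h : l.length = 10) :
    ((l.sum : Int) : ZMod 1000000000) = ∑ i : Fin 10, vz l i := by
  obtain ⟨a0,a1,a2,a3,a4,a5,a6,a7,a8,a9, rfl⟩ := exists_ten l h
  simp [vz, Fin.sum_univ_succ]

lemma vz_iterate (n : Nat) : vz (stepA^[n] row0) = (Tz ^ n).mulVec (vz row0) := by
  induction n with
  | zero => simp [Matrix.one_mulVec]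
  | succ n ih =>
    rw [Function.iterate_succ_apply', vz_stepA _ (length_iter n), ih,
      Matrix.mulVec_mulVec, ← pow_succ']

lemma cast_dsum (P : List (List Int)) :
    ((((List.range 10).map (fun i =>
        ((List.range 10).map (fun j => ((P.getD i []).getD j 0) * (row0.getD j 0))).sum)).sum : Int)
      : ZMod 1000000000) = ∑ i : Fin 10, ((mz P).mulVec (vz row0)) i := by
  rw [show List.range 10 = [0,1,2,3,4,5,6,7,8,9] from rfl]
  simp [Matrix.mulVec, dotProduct, Fin.sum_univ_succ, mz, vz, row0]

lemma mod_eq_of_cast_eq (x y : Int)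
    (h : ((x : Int) : ZMod 1000000000) = ((y : Int) : ZMod 1000000000)) :
    PySem.Int.mod x 1000000000 = PySem.Int.mod y 1000000000 := by
  rw [PySem.Int.mod_eq_emod_of_pos (by norm_num : (0:Int) < 1000000000),
      PySem.Int.mod_eq_emod_of_pos (by norm_num : (0:Int) < 1000000000)]
  have h2 := (ZMod.intCast_eq_intCast_iff _ _ _).mp h
  unfold Int.ModEq at h2
  rwa [(by norm_num : ((1000000000 : Nat) : Int) = (1000000000 : Int))] at h2

-- Bridge: the Array port of A computes the List model listA.
lemma arr_getD {α : Type} (a : Array α) (i : Nat) (d : α) : a.getD i d = a.toList.getD i d := by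
  unfold Array.getD
  split <;> rename_i h
  · rw [List.getD_eq_getElem?_getD, List.getElem?_eq_getElem (by simpa using h)]
    simp [Array.getElem_toList]
  · rw [List.getD_eq_getElem?_getD, List.getElem?_eq_none (by simpa using Nat.le_of_not_lt h)]
    rfl

lemma arr_setD {α : Type} (a : Array α) (i : Nat) (v : α) :
    (a.setIfInBounds i v).toList = a.toList.set i v := by
  unfold Array.setIfInBounds
  split <;> rename_i h
  · simp [Array.toList_set]
  · rw [List.set_eq_of_length_le (by simpa using Nat.le_of_not_lt h)]

def dL (dp : Array (Array Int)) : List (List Int) := dp.toList.map Array.toList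

lemma dL_getD (dp : Array (Array Int)) (m : Nat) :
    (dp.getD m #[]).toList = (dL dp).getD m [] := by
  rw [arr_getD, dL, List.getD_eq_getElem?_getD, List.getD_eq_getElem?_getD, List.getElem?_map]
  cases h : dp.toList[m]? <;> simp

lemma dL_setD (dp : Array (Array Int)) (m : Nat) (r : Array Int) :
    dL (dp.setIfInBounds m r) = (dL dp).set m r.toList := by
  rw [dL, arr_setD, List.map_set]
  rfl

lemma elem_sim (dp : Array (Array Int)) (m k : Nat) :
    (dp.getD m #[]).getD k 0 = ((dL dp).getD m []).getD k 0 := by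
  rw [arr_getD, dL_getD]

lemma pyGetD_nn {α : Type} (xs : List α) (i : Int) (d : α) (h : 0 ≤ i) :
    PySem.List.pyGetD xs i d = xs.getD i.toNat d := by
  have := PySem.List.pyGetD_natCast xs i.toNat d
  rwa [show ((i.toNat : Nat) : Int) = i from by omega] at this

lemma aInner_sim (i j : Int) (hi : 0 ≤ i) (hj : 1 ≤ j) (dp : Array (Array Int)) :
    dL (aInner i dp j) = aInnerL i (dL dp) j := by
  unfold aInner aInnerL
  rw [PySem.List.pySetD_of_nonneg _ _ (by omega), PySem.List.pySetD_of_nonneg _ _ (by omega),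
    pyGetD_nn _ _ _ (by omega), pyGetD_nn _ _ _ (by omega), pyGetD_nn _ _ _ (by omega),
    pyGetD_nn _ _ _ (by omega)]
  rw [dL_setD, arr_setD, dL_getD, elem_sim, elem_sim]

lemma inner_foldl_sim (i : Int) (hi : 0 ≤ i) (js : List Int) (hjs : ∀ j ∈ js, 1 ≤ j)
    (dp : Array (Array Int)) :
    dL (js.foldl (aInner i) dp) = js.foldl (aInnerL i) (dL dp) := by
  induction js generalizing dp with
  | nil => rfl
  | cons j js ih =>
    rw [List.foldl_cons, List.foldl_cons, ih (fun x hx => hjs x (by simp [hx])),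
      aInner_sim i j hi (hjs j (by simp))]

lemma aOuter_sim (i : Int) (hi : 0 ≤ i) (dp : Array (Array Int)) :
    dL (aOuter dp i) = aOuterL (dL dp) i := by
  have h1 : ∀ (dp : Array (Array Int)) (m k : Nat) (v : Int),
      dL (dp.setIfInBounds m ((dp.getD m #[]).setIfInBounds k v))
        = (dL dp).set m (((dL dp).getD m []).set k v) := by
    intro dp m k v
    rw [dL_setD, arr_setD, dL_getD]
  unfold aOuter aOuterL
  rw [inner_foldl_sim i hi _ (fun x hx => by
    have := (PySem.List.mem_pyRange_one).mp hx; omega)]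
  congr 1
  rw [PySem.List.pySetD_of_nonneg _ _ (by omega), PySem.List.pySetD_of_nonneg _ _ (by omega),
    PySem.List.pySetD_of_nonneg _ _ (by omega), PySem.List.pySetD_of_nonneg _ _ (by omega),
    pyGetD_nn _ _ _ (by omega), pyGetD_nn _ _ _ (by omega),
    pyGetD_nn _ _ _ (by omega), pyGetD_nn _ _ _ (by omega)]
  rw [h1, h1, elem_sim, elem_sim]
  rw [pyGetD_nn _ _ _ (by omega), pyGetD_nn _ _ _ (by omega)]
  rw [h1]
  simp only [show Int.toNat 9 = 9 from rfl, show Int.toNat 8 = 8 from rfl, show Int.toNat 0 = 0 from rfl, show Int.toNat 1 = 1 from rfl]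

lemma outer_foldl_sim (is : List Int) (his : ∀ x ∈ is, 0 ≤ x) (dp : Array (Array Int)) :
    dL (is.foldl aOuter dp) = is.foldl aOuterL (dL dp) := by
  induction is generalizing dp with
  | nil => rfl
  | cons x xs ih =>
    rw [List.foldl_cons, List.foldl_cons, ih (fun y hy => his y (by simp [hy])),
      aOuter_sim x (his x (by simp))]

lemma last_sim (l : List (List Int)) :
    l.getD (l.length - 1) [] = PySem.List.pyGetD l (-1) [] := by
  rcases eq_or_ne l [] with rfl | hne
  · rfl
  · rw [PySem.List.pyGetD_neg_one _ _ hne, List.getLast_eq_getElem,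
      List.getD_eq_getElem?_getD,
      List.getElem?_eq_getElem (by have := List.length_pos_iff.mpr hne; omega)]
    rfl

lemma port_eq_listA (digits : Int) : get_num_of_stair_nums digits = listA digits := by
  show PySem.Int.mod (((PySem.List.pyRange 0 (digits-1) 1).foldl aOuter
      ((((PySem.List.pyRange 0 digits 1).map (fun _ => (List.replicate 10 (0:Int)).toArray)).toArray).setIfInBounds 0
        (0 :: List.replicate 9 (1:Int)).toArray)).getD
      (((PySem.List.pyRange 0 (digits-1) 1).foldl aOuter
      ((((PySem.List.pyRange 0 digits 1).map (fun _ => (List.replicate 10 (0:Int)).toArray)).toArray).setIfInBounds 0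
        (0 :: List.replicate 9 (1:Int)).toArray)).size - 1) #[]).toList.sum 1000000000
    = PySem.Int.mod (PySem.List.pyGetD ((PySem.List.pyRange 0 (digits-1) 1).foldl aOuterL
      (PySem.List.pySetD ((PySem.List.pyRange 0 digits 1).map (fun _ => List.replicate 10 (0:Int))) 0
        (0 :: List.replicate 9 (1:Int)))) (-1) []).sum 1000000000
  set dpA0 := (((PySem.List.pyRange 0 digits 1).map
      (fun _ => (List.replicate 10 (0:Int)).toArray)).toArray).setIfInBounds 0
      (0 :: List.replicate 9 (1:Int)).toArray with hdpA0
  have h1 : dL (((PySem.List.pyRange 0 digits 1).map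
      (fun _ => (List.replicate 10 (0:Int)).toArray)).toArray)
      = (PySem.List.pyRange 0 digits 1).map (fun _ => List.replicate 10 (0:Int)) := by
    rw [dL]
    simp [List.map_map, Function.comp_def]
  have hinit : dL dpA0 = PySem.List.pySetD
      ((PySem.List.pyRange 0 digits 1).map (fun _ => List.replicate 10 (0:Int))) 0
      (0 :: List.replicate 9 (1:Int)) := by
    rw [hdpA0, dL_setD, PySem.List.pySetD_of_nonneg _ _ (le_refl (0:Int)), h1]
    rfl
  set F := (PySem.List.pyRange 0 (digits-1) 1).foldl aOuter dpA0 with hF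
  have hsim : dL F = (PySem.List.pyRange 0 (digits-1) 1).foldl aOuterL (dL dpA0) := by
    rw [hF]
    exact outer_foldl_sim _ (fun x hx => by
      have := (PySem.List.mem_pyRange_one).mp hx; omega) _
  rw [← hinit, ← hsim]
  have hsize : F.size = (dL F).length := by rw [dL]; simp
  rw [hsize, dL_getD, last_sim]

-- ===== VERDICT =====
theorem get_num_of_stair_nums_spec : Claim_equal_get_num_of_stair_nums := by
  intro digits _ hpre
  show get_num_of_stair_nums digits = get_num_of_stair_nums_alt digits
  rw [port_eq_listA, A_char digits hpre]
  have hB : get_num_of_stair_nums_alt digits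
      = PySem.Int.mod (((List.range 10).map (fun i =>
          ((List.range 10).map (fun j =>
            (((matPow ((List.range 10).map (fun i => (List.range 10).map
                (fun j => if ((i:Int) - (j:Int)).natAbs = 1 then (1:Int) else 0)))
              (digits - 1).toNat).getD i []).getD j 0) * (row0.getD j 0))).sum)).sum) 1000000000 := rfl
  rw [hB]
  apply mod_eq_of_cast_eq
  rw [cast_sum_ten _ (length_iter _), cast_dsum, vz_iterate, mz_matPow, Tz_eq]
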